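-- pv_equiv track=rewrite | github.com/Attendance-PNE-OFB/app | analyseCLIP.py | calculer_nombre_activite
-- ===== SOURCE A (Python) =====
-- def calculer_nombre_activite(json_data):
--     sum = [0, 0, 0] #hiker | skier | moutain biker
--     for image_name in json_data:
--         for x in json_data[image_name].get("type", {}):
--             if x=="randonnee":
--                 sum[0] += 1
--             elif x=="ski":
--                 sum[1] += 1
--             elif x=="vtt" or x=="vtt-electrique":
--                 sum[2] += 1
--     return sum
-- ===== SOURCE B (Python) =====
-- def calculer_nombre_activite(json_data):
--     # Stage 1: flatten all type entries across images into one list.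
--     # Stage 2: one independent counting pass per bucket via list.count.
--     types = [t for image_name in json_data
--                for t in json_data[image_name].get("type", {})]
--     return [types.count("randonnee"),
--             types.count("ski"),
--             types.count("vtt") + types.count("vtt-electrique")]
-- ===== Notes on version B (the rewrite author's own statement) =====
-- stated objective: idiomatic
-- what changed: Replaces A's single branching pass with mutable counters by a flatten step followed by four independent list.count scans, one per tag, with no conditional logic at all.
import Mathlib
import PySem

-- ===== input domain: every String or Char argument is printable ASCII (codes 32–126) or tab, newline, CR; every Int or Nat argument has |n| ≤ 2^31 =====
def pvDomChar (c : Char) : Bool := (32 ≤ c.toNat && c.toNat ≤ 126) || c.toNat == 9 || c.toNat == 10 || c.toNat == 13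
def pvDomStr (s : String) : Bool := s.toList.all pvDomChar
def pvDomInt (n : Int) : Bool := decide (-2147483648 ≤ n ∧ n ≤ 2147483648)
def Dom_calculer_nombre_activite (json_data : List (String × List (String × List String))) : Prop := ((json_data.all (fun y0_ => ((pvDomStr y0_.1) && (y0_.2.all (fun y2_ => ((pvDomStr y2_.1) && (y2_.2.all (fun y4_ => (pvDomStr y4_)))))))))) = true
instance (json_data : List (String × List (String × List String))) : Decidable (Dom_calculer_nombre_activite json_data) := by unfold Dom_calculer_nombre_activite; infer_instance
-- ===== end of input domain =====

-- B replaces A's single branching pass by a flatten step plus independent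
-- list.count scans per tag (idiomatic, same asymptotic cost).

-- ===== PORT A =====
-- json_data[image_name].get("type", {}) for one image key
def pvTypesA (json_data : List (String × List (String × List String)))
    (image_name : String) : List String :=
  (PySem.Dict.mk ((PySem.Dict.mk json_data).getD image_name [])).getD "type" []

def calculer_nombre_activite (json_data : List (String × List (String × List String))) : List Int :=
  json_data.foldl
    (fun sum kv =>
      (pvTypesA json_data kv.1).foldl
        (fun sum x =>
          if x = "randonnee" then sum.set 0 (sum.getD 0 0 + 1)
          else if x = "ski" then sum.set 1 (sum.getD 1 0 + 1)
          else if x = "vtt" ∨ x = "vtt-electrique" then sum.set 2 (sum.getD 2 0 + 1)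
          else sum)
        sum)
    [0, 0, 0]

-- ===== PORT B =====
-- flatten of all type entries across images (B's list comprehension)
def pvTypesB (json_data : List (String × List (String × List String))) : List String :=
  json_data.flatMap (fun kv =>
    (PySem.Dict.mk ((PySem.Dict.mk json_data).getD kv.1 [])).getD "type" [])

def calculer_nombre_activite_alt (json_data : List (String × List (String × List String))) : List Int :=
  let types := pvTypesB json_data
  [(PySem.List.count types "randonnee" : Int),
   (PySem.List.count types "ski" : Int),
   (PySem.List.count types "vtt" : Int) + (PySem.List.count types "vtt-electrique" : Int)]

-- ===== PRECONDITION & SPEC =====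
def Spec_calculer_nombre_activite (json_data : List (String × List (String × List String))) (out : List Int) : Prop := out = calculer_nombre_activite_alt json_data
instance (json_data : List (String × List (String × List String))) (out : List Int) : Decidable (Spec_calculer_nombre_activite json_data out) := by unfold Spec_calculer_nombre_activite; infer_instance

-- ===== CLAIM (what is proved, stated in full; the proofs are below) =====
def Claim_equal_calculer_nombre_activite : Prop := ∀ (json_data : List (String × List (String × List String))), Dom_calculer_nombre_activite json_data → Spec_calculer_nombre_activite json_data (calculer_nombre_activite json_data)

-- ===== LEMMAS AND PROOFS =====

-- A's inner step on a 3-element counter list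
def pvStepA (sum : List Int) (x : String) : List Int :=
  if x = "randonnee" then sum.set 0 (sum.getD 0 0 + 1)
  else if x = "ski" then sum.set 1 (sum.getD 1 0 + 1)
  else if x = "vtt" ∨ x = "vtt-electrique" then sum.set 2 (sum.getD 2 0 + 1)
  else sum

lemma pvFoldA_counts (ts : List String) (a b c : Int) :
    ts.foldl pvStepA [a, b, c] =
      [a + ts.count "randonnee", b + ts.count "ski",
       c + ts.count "vtt" + ts.count "vtt-electrique"] := by
  induction ts generalizing a b c with
  | nil => simp
  | cons x ts ih =>
    simp only [List.foldl_cons, List.count_cons, pvStepA]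
    by_cases h1 : x = "randonnee"
    · simp [h1, ih]; ring
    · by_cases h2 : x = "ski"
      · simp [h2, ih]; ring
      · by_cases h3 : x = "vtt" ∨ x = "vtt-electrique"
        · rcases h3 with h3 | h3 <;>
            simp [h3, ih, List.set] <;> ring
        · push Not at h3
          simp [h1, h2, h3.1, h3.2, ih]

lemma pvA_eq_flat (json_data : List (String × List (String × List String))) :
    calculer_nombre_activite json_data =
      (pvTypesB json_data).foldl pvStepA [0, 0, 0] := by
  unfold calculer_nombre_activite pvTypesB pvTypesA
  rw [List.flatMap_def, List.foldl_flatten, List.foldl_map]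
  rfl

theorem calculer_nombre_activite_spec_aux (json_data : List (String × List (String × List String))) :
    calculer_nombre_activite json_data = calculer_nombre_activite_alt json_data := by
  rw [pvA_eq_flat, pvFoldA_counts]
  unfold calculer_nombre_activite_alt
  simp [PySem.List.count_eq]

-- ===== VERDICT (by name: the statement is the Claim_ definition above) =====
theorem calculer_nombre_activite_spec : Claim_equal_calculer_nombre_activite := by
  intro jd _
  unfold Spec_calculer_nombre_activite
  exact calculer_nombre_activite_spec_aux jd
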